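-- pv_equiv track=rewrite | github.com/WitoldTrzeciakowski/Project_AAC | Spectral_stuff/matrix_det.py | determinant_of_matrix
-- ===== SOURCE A (Python) =====
-- def get_cofactor(mat, p, q, n):
--     temp = []
--     for row in range(n):
--         if row != p:
--             new_row = [mat[row][col] for col in range(n) if col != q]
--             temp.append(new_row)
--     return temp
--
-- def determinant_of_matrix(mat):
--     n = len(mat)
--     if n == 1:
--         return mat[0][0]
--     D = 0
--     sign = 1
--     for f in range(n):
--         temp = get_cofactor(mat, 0, f, n)
--         D += sign * mat[0][f] * determinant_of_matrix(temp)
--         sign = -sign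
--     return D
-- ===== SOURCE B (Python) =====
-- def combinations_list(items, k):
--     if k == 0:
--         return [()]
--     if not items:
--         return []
--     rest = items[1:]
--     with_first = [(items[0],) + c for c in combinations_list(rest, k - 1)]
--     return with_first + combinations_list(rest, k)
--
-- def determinant_of_matrix(mat):
--     # Dynamic programming over column subsets (Laplace expansion memoised
--     # bottom-up): dp maps each size-s column subset S to the determinant of
--     # the submatrix formed by the last s rows and the columns S.
--     n = len(mat)
--     cols = tuple(range(n))
--     dp = {(): 1}
--     for size in range(1, n + 1):
--         row = mat[n - size]
--         new_dp = {}
--         for subset in combinations_list(cols, size):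
--             acc = 0
--             sign = 1
--             for idx in range(size):
--                 acc += sign * row[subset[idx]] * dp[subset[:idx] + subset[idx + 1:]]
--                 sign = -sign
--             new_dp[subset] = acc
--         dp = new_dp
--     return dp[cols]
-- ===== Notes on version B (the rewrite author's own statement) =====
-- stated objective: faster
-- what changed: Replaces the naive O(n!) recursive cofactor expansion by bottom-up dynamic programming over column subsets (dp[S] = determinant of the last |S| rows restricted to columns S), so each of the 2^n subproblems is computed once instead of factorially many times.
-- intended difference: On the empty matrix [] A returns 0 while B returns 1; the determinant of the empty 0x0 matrix is conventionally 1 (the multiplicative identity, consistent with det of a block decomposition), so B's value is the intended one. — e.g. on determinant_of_matrix([]): A returns 0, B returns 1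
import Mathlib
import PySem

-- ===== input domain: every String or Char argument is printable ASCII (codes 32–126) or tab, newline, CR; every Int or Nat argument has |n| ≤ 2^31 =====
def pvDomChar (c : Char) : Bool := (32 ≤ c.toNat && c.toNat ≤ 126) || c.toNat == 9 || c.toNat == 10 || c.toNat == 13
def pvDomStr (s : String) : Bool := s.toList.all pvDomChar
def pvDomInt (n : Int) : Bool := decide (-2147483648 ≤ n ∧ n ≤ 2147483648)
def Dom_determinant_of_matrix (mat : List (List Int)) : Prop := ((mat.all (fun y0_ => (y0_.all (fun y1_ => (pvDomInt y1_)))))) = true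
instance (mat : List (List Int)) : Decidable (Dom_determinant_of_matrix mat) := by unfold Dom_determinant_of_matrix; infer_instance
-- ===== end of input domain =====

-- B replaces A's naive recursive cofactor expansion by bottom-up dynamic
-- programming over column subsets (each subproblem computed once); on the
-- empty matrix A returns 0 while B returns the conventional value 1 (see D_).


-- ===== PORT A =====
def get_cofactor (mat : List (List Int)) (p q n : Int) : List (List Int) :=
  (PySem.List.pyRange 0 n 1).foldl (fun temp row =>
    if row ≠ p then
      temp ++ [((PySem.List.pyRange 0 n 1).filter (fun col => col ≠ q)).map
                 (fun col => PySem.List.pyGetD (PySem.List.pyGetD mat row []) col 0)]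
    else temp) []

-- needed by the termination proof of the port, so it stays above it
theorem length_get_cofactor (mat : List (List Int)) (q n : Int) (hn : 1 ≤ n) :
    (get_cofactor mat 0 q n).length = (n - 1).toNat := by
  unfold get_cofactor
  rw [PySem.List.foldl_append_ite]
  rw [PySem.List.pyRange_one_cons (by omega)]
  simp only [List.filter_cons, List.nil_append, List.length_map, decide_eq_true_eq]
  rw [if_neg (by simp)]
  rw [List.filter_eq_self.mpr (by
    intro x hx
    have := (PySem.List.mem_pyRange_one).mp hx
    simp; omega)]
  rw [PySem.List.length_pyRange_one]
  omega

def determinant_of_matrix (mat : List (List Int)) : Int :=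
  if PySem.List.len mat = 1 then PySem.List.pyGetD (PySem.List.pyGetD mat 0 []) 0 0
  else
    ((PySem.List.pyRange 0 (PySem.List.len mat) 1).attach.foldl
      (fun (st : Int × Int) f =>
        (st.1 + st.2 * PySem.List.pyGetD (PySem.List.pyGetD mat 0 []) f.1 0 *
          determinant_of_matrix (get_cofactor mat 0 f.1 (PySem.List.len mat)), -st.2))
      (0, 1)).1
termination_by mat.length
decreasing_by
  have hf := (PySem.List.mem_pyRange_one).mp f.2
  have hlen := PySem.List.len_eq mat
  have h1 : 1 ≤ PySem.List.len mat := by omega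
  rw [length_get_cofactor mat f.1 (PySem.List.len mat) h1]
  omega

-- ===== PORT B =====
def combinations_list (items : List Int) (k : Nat) : List (List Int) :=
  match k, items with
  | 0, _ => [[]]
  | _+1, [] => []
  | k'+1, x :: rest =>
      (combinations_list rest k').map (fun c => x :: c) ++ combinations_list rest (k'+1)

def determinant_of_matrix_alt (mat : List (List Int)) : Int :=
  let n : Int := PySem.List.len mat
  let cols : List Int := PySem.List.pyRange 0 n 1
  let final := (PySem.List.pyRange 1 (n + 1) 1).foldl (fun dp size =>
      (combinations_list cols size.toNat).foldl (fun new_dp subset =>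
        PySem.Dict.insert new_dp subset
          (((PySem.List.pyRange 0 size 1).foldl (fun (st : Int × Int) idx =>
            (st.1 + st.2 * PySem.List.pyGetD (PySem.List.pyGetD mat (n - size) [])
                      (PySem.List.pyGetD subset idx 0) 0 *
               PySem.Dict.getD dp
                 (PySem.List.slice subset none (some idx) ++
                  PySem.List.slice subset (some (idx + 1)) none) 0,
             -st.2)) (0, 1)).1)) PySem.Dict.empty)
    (PySem.Dict.insert PySem.Dict.empty [] 1)
  PySem.Dict.getD final cols 0

-- ===== PRECONDITION & SPEC =====
-- Pre_ is exactly where the Python A returns: if any row is shorter than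
-- len(mat), A raises IndexError (extra columns beyond len(mat) are ignored).
def Pre_determinant_of_matrix (mat : List (List Int)) : Prop :=
  ∀ row ∈ mat, mat.length ≤ row.length
instance (mat : List (List Int)) : Decidable (Pre_determinant_of_matrix mat) := by
  unfold Pre_determinant_of_matrix; infer_instance
def pvWitness_determinant_of_matrix : List (List Int) := [[1, 2], [3, 4]]

-- On the empty matrix [] A returns 0 while B returns 1; the determinant of the
-- empty 0x0 matrix is conventionally 1 (the multiplicative identity), so B's
-- value is the intended one.
def D_determinant_of_matrix (mat : List (List Int)) : Prop := mat = []
instance (mat : List (List Int)) : Decidable (D_determinant_of_matrix mat) := by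
  unfold D_determinant_of_matrix; infer_instance

def Spec_determinant_of_matrix (mat : List (List Int)) (out : Int) : Prop :=
  ¬ D_determinant_of_matrix mat → out = determinant_of_matrix_alt mat
instance (mat : List (List Int)) (out : Int) : Decidable (Spec_determinant_of_matrix mat out) := by
  unfold Spec_determinant_of_matrix; infer_instance

def pvDiffWitness_determinant_of_matrix : List (List Int) := []
def pvDiffWitnessOut_determinant_of_matrix : Int × Int := (0, 1)

-- ===== CLAIM (what is proved, stated in full; the proofs are below) =====
def Claim_unchanged_determinant_of_matrix : Prop := ∀ (mat : List (List Int)), Dom_determinant_of_matrix mat → Pre_determinant_of_matrix mat → Spec_determinant_of_matrix mat (determinant_of_matrix mat)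
def Claim_changed_determinant_of_matrix : Prop := Dom_determinant_of_matrix (pvDiffWitness_determinant_of_matrix) ∧ Pre_determinant_of_matrix (pvDiffWitness_determinant_of_matrix) ∧ D_determinant_of_matrix (pvDiffWitness_determinant_of_matrix) ∧ determinant_of_matrix (pvDiffWitness_determinant_of_matrix) = pvDiffWitnessOut_determinant_of_matrix.1 ∧ determinant_of_matrix_alt (pvDiffWitness_determinant_of_matrix) = pvDiffWitnessOut_determinant_of_matrix.2 ∧ pvDiffWitnessOut_determinant_of_matrix.1 ≠ pvDiffWitnessOut_determinant_of_matrix.2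
def Claim_exact_determinant_of_matrix : Prop := ∀ (mat : List (List Int)), Dom_determinant_of_matrix mat → Pre_determinant_of_matrix mat → D_determinant_of_matrix mat → determinant_of_matrix mat ≠ determinant_of_matrix_alt mat

-- ===== LEMMAS AND PROOFS =====

-- entry access shared by both ports: row[c] with default 0
def ent (r : List Int) (c : Int) : Int := PySem.List.pyGetD r c 0

-- the materialised submatrix: rows R restricted to the column list S
def Mx (R : List (List Int)) (S : List Int) : List (List Int) :=
  R.map (fun r => S.map (fun c => ent r c))

-- the common mathematical value: Laplace expansion along the first row,
-- consuming one row of R per element of S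
def v : List (List Int) → List Int → Int
  | _, [] => 1
  | [], _ :: _ => 1
  | r :: R, c :: S =>
      ∑ f ∈ Finset.range (c :: S).length,
        (-1 : Int) ^ f * PySem.List.pyGetD r ((c :: S).getD f 0) 0 * v R ((c :: S).eraseIdx f)

theorem v_nil (R : List (List Int)) : v R [] = 1 := by cases R <;> rfl

theorem v_cons (r : List Int) (R : List (List Int)) (S : List Int) (h : S ≠ []) :
    v (r :: R) S = ∑ f ∈ Finset.range S.length,
      (-1 : Int) ^ f * PySem.List.pyGetD r (S.getD f 0) 0 * v R (S.eraseIdx f) := by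
  cases S with
  | nil => exact absurd rfl h
  | cons c S => rfl

def colsI (n : Nat) : List Int := PySem.List.pyRange 0 (n : Int) 1

-- the alternating-sign accumulator loop is a signed sum
theorem signLoop (t u : Nat → Int) (m : Nat) (D s : Int) :
    (List.range m).foldl (fun st f => (st.1 + st.2 * t f * u f, -st.2)) (D, s)
      = (D + ∑ f ∈ Finset.range m, s * (-1) ^ f * t f * u f, s * (-1) ^ m) := by
  induction m with
  | zero => simp
  | succ m ih =>
      rw [List.range_succ, List.foldl_append, ih]
      simp only [List.foldl_cons, List.foldl_nil, Finset.sum_range_succ, Prod.mk.injEq]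
      constructor <;> ring

theorem loop_expand (X : List (List Int)) (h : X.length ≠ 1) :
    determinant_of_matrix X = ∑ f ∈ Finset.range X.length,
      (-1 : Int) ^ f * PySem.List.pyGetD (PySem.List.pyGetD X 0 []) (f : Int) 0 *
        determinant_of_matrix (get_cofactor X 0 (f : Int) (X.length : Int)) := by
  rw [determinant_of_matrix]
  rw [if_neg (by rw [PySem.List.len_eq]; exact_mod_cast h)]
  rw [List.foldl_attach (f := fun (st : Int × Int) (y : Int) =>
      (st.1 + st.2 * PySem.List.pyGetD (PySem.List.pyGetD X 0 []) y 0 *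
        determinant_of_matrix (get_cofactor X 0 y (PySem.List.len X)), -st.2))]
  rw [PySem.List.len_eq, PySem.List.pyRange_zero_natCast, List.foldl_map]
  rw [signLoop (fun f => PySem.List.pyGetD (PySem.List.pyGetD X 0 []) (f : Int) 0)
      (fun f => determinant_of_matrix (get_cofactor X 0 (f : Int) (X.length : Int)))
      X.length 0 1]
  simp only [one_mul, zero_add]

theorem filter_ne_eraseIdx (n f : Nat) (hf : f < n) :
    (colsI n).filter (fun c => decide (c ≠ (f : Int))) = (colsI n).eraseIdx f := by
  have hcons : PySem.List.pyRange (f : Int) (n : Int) 1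
      = (f : Int) :: PySem.List.pyRange ((f : Int) + 1) (n : Int) 1 :=
    PySem.List.pyRange_one_cons (by exact_mod_cast hf)
  have hsplit : colsI n = (PySem.List.pyRange 0 (f : Int) 1 ++ [(f : Int)])
      ++ PySem.List.pyRange ((f : Int) + 1) (n : Int) 1 := by
    unfold colsI
    rw [PySem.List.pyRange_one_append 0 (f : Int) (n : Int) (by omega) (by omega), hcons]
    simp
  have hlenf : (PySem.List.pyRange 0 (f : Int) 1).length = f := by
    rw [PySem.List.length_pyRange_one]; omega
  have herase : (((PySem.List.pyRange 0 (f : Int) 1 ++ [(f : Int)])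
      ++ PySem.List.pyRange ((f : Int) + 1) (n : Int) 1)).eraseIdx f
      = PySem.List.pyRange 0 (f : Int) 1 ++ PySem.List.pyRange ((f : Int) + 1) (n : Int) 1 := by
    rw [List.eraseIdx_eq_take_drop_succ]
    have htake : List.take f ((PySem.List.pyRange 0 (f : Int) 1 ++ [(f : Int)])
        ++ PySem.List.pyRange ((f : Int) + 1) (n : Int) 1)
        = PySem.List.pyRange 0 (f : Int) 1 := by
      rw [List.append_assoc]; exact List.take_left' hlenf
    have hdrop : List.drop (f + 1) ((PySem.List.pyRange 0 (f : Int) 1 ++ [(f : Int)])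
        ++ PySem.List.pyRange ((f : Int) + 1) (n : Int) 1)
        = PySem.List.pyRange ((f : Int) + 1) (n : Int) 1 :=
      List.drop_left' (by simp [hlenf])
    rw [htake, hdrop]
  rw [hsplit, herase, List.append_assoc, List.singleton_append,
      List.filter_append, List.filter_cons]
  rw [List.filter_eq_self.mpr (by
    intro x hx
    have := (PySem.List.mem_pyRange_one).mp hx
    simp only [decide_eq_true_eq]; omega)]
  rw [List.filter_eq_self.mpr (by
    intro x hx
    have := (PySem.List.mem_pyRange_one).mp hx
    simp only [decide_eq_true_eq]; omega)]
  simp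

theorem cof_eq (X : List (List Int)) (n f : Nat) (hn : X.length = n) (hf : f < n) :
    get_cofactor X 0 (f : Int) (n : Int) = Mx X.tail ((colsI n).eraseIdx f) := by
  unfold get_cofactor
  rw [PySem.List.foldl_append_ite, List.nil_append]
  rw [show (PySem.List.pyRange 0 (n : Int) 1).filter (fun col => decide (col ≠ (f : Int)))
        = (colsI n).eraseIdx f from filter_ne_eraseIdx n f hf]
  rw [show (PySem.List.pyRange 0 (n : Int) 1).filter (fun row => decide (row ≠ (0 : Int)))
        = PySem.List.pyRange 1 (n : Int) 1 from by
    rw [PySem.List.pyRange_one_cons (by omega : (0 : Int) < (n : Int)), List.filter_cons,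
        if_neg (by simp)]
    exact List.filter_eq_self.mpr (by
      intro x hx
      have := (PySem.List.mem_pyRange_one).mp hx
      simp only [decide_eq_true_eq]; omega)]
  have hlist : PySem.List.pyRange 1 (n : Int) 1
      = (List.range (n - 1)).map (fun (k : Nat) => 1 + (k : Int)) := by
    rw [PySem.List.pyRange_one 1 (n : Int),
        show ((n : Int) - 1).toNat = n - 1 from by omega]
  rw [hlist]
  apply List.ext_getElem
  · simp only [List.length_map, List.length_range, Mx, List.length_tail]
    omega
  · intro i h1 h2
    have hi : i < n - 1 := by
      simp only [List.length_map, List.length_range] at h1; exact h1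
    have hit : i < X.tail.length := by
      simp only [List.length_tail]; omega
    simp only [List.getElem_map, List.getElem_range, Mx]
    have hrow : PySem.List.pyGetD X (1 + (i : Int)) [] = X.tail[i] := by
      rw [PySem.List.pyGetD_eq_getElem X [] (by omega) (by rw [hn]; exact_mod_cast by omega)]
      rw [List.getElem_tail]
      have ht : ((1 : Int) + (i : Int)).toNat = i + 1 := by omega
      simp only [ht]
    rw [hrow]
    rfl

theorem Mx_collapse (R : List (List Int)) (S T : List Int)
    (hT : ∀ t ∈ T, 0 ≤ t ∧ t < (S.length : Int)) :
    Mx (Mx R S) T = Mx R (T.map (fun t => ent S t)) := by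
  unfold Mx
  rw [List.map_map]
  apply List.map_congr_left
  intro r _
  rw [List.map_map]
  apply List.map_congr_left
  intro t ht
  obtain ⟨ht0, ht1⟩ := hT t ht
  show ent (S.map (fun c => ent r c)) t = ent r (ent S t)
  rw [ent, ent, ent, PySem.List.pyGetD_eq_getElem _ _ ht0 (by simpa using ht1),
      PySem.List.pyGetD_eq_getElem _ _ ht0 (by simpa using ht1)]
  simp [ent]

theorem gather_erase (S : List Int) (n f : Nat) (hn : S.length = n) (hf : f < n) :
    ((colsI n).eraseIdx f).map (fun t => ent S t) = S.eraseIdx f := by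
  unfold colsI
  rw [PySem.List.pyRange_zero_natCast, List.eraseIdx_map, List.map_map]
  apply List.ext_getElem
  · simp only [List.length_map, List.length_eraseIdx, List.length_range, hn]
  · intro i h1 h2
    have hi : i < n - 1 := by
      simp only [List.length_map, List.length_eraseIdx, List.length_range] at h1
      rw [if_pos hf] at h1; exact h1
    simp only [List.getElem_map, Function.comp_apply, List.getElem_eraseIdx,
      List.getElem_range]
    split
    · show ent S ((i : Nat) : Int) = S[i]
      rw [ent, PySem.List.pyGetD_eq_getElem S 0 (by omega) (by exact_mod_cast by omega)]
      simp
    · show ent S (((i + 1 : Nat)) : Int) = S[i + 1]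
      rw [ent, PySem.List.pyGetD_eq_getElem S 0 (by omega) (by exact_mod_cast by omega)]
      simp

theorem A_v (R : List (List Int)) (S : List Int) (hlen : R.length = S.length) (hne : S ≠ []) :
    determinant_of_matrix (Mx R S) = v R S := by
  induction R generalizing S with
  | nil =>
      exact absurd (List.length_eq_zero_iff.mp hlen.symm) hne
  | cons r R ih =>
      by_cases hR : R = []
      · subst hR
        obtain ⟨c, rfl⟩ : ∃ c, S = [c] := by
          cases S with
          | nil => simp at hlen
          | cons a t =>
              cases t with
              | nil => exact ⟨a, rfl⟩
              | cons b u => simp at hlen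
        have hM : Mx [r] [c] = [[ent r c]] := rfl
        rw [hM, determinant_of_matrix, if_pos (by simp [PySem.List.len_eq])]
        simp only [PySem.List.pyGetD_zero_cons]
        simp [v, ent]
      · have hR1 : 1 ≤ R.length := by
          cases R with
          | nil => exact absurd rfl hR
          | cons a t => simp
        have hS2 : 2 ≤ S.length := by
          simp only [List.length_cons] at hlen; omega
        have hMxlen : (Mx (r :: R) S).length = S.length := by
          simp only [Mx, List.length_map, List.length_cons]
          simp only [List.length_cons] at hlen; omega
        rw [loop_expand (Mx (r :: R) S) (by rw [hMxlen]; omega)]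
        simp only [hMxlen]
        rw [v_cons r R S hne]
        apply Finset.sum_congr rfl
        intro f hf
        have hf' : f < S.length := Finset.mem_range.mp hf
        have h0 : PySem.List.pyGetD (Mx (r :: R) S) 0 []
            = S.map (fun c => ent r c) := by
          simp only [Mx, List.map_cons, PySem.List.pyGetD_zero_cons]
        have hent : PySem.List.pyGetD (S.map (fun c => ent r c)) (f : Int) 0
            = PySem.List.pyGetD r (S.getD f 0) 0 := by
          rw [PySem.List.pyGetD_natCast,
              List.getD_eq_getElem _ _ (by simpa using hf'), List.getElem_map,
              List.getD_eq_getElem _ _ hf']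
          rfl
        have hcof : get_cofactor (Mx (r :: R) S) 0 (f : Int) (S.length : Int)
            = Mx R (S.eraseIdx f) := by
          rw [cof_eq (Mx (r :: R) S) S.length f hMxlen hf']
          have htail : (Mx (r :: R) S).tail = Mx R S := rfl
          rw [htail]
          rw [Mx_collapse R S _ (by
            intro t ht
            have := (PySem.List.mem_pyRange_one).mp
              (List.Sublist.mem ht (List.eraseIdx_sublist (colsI S.length) f))
            omega)]
          rw [gather_erase S S.length f rfl hf']
        rw [h0, hent, hcof]
        rw [ih (S.eraseIdx f) (by
            simp only [List.length_eraseIdx, if_pos hf']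
            simp only [List.length_cons] at hlen; omega)
          (by
            intro hnil
            have := congrArg List.length hnil
            simp only [List.length_eraseIdx, if_pos hf'] at this
            simp at this; omega)]

theorem A_top (mat : List (List Int)) (h : mat ≠ []) :
    determinant_of_matrix mat = v mat (colsI mat.length) := by
  by_cases hl : mat.length = 1
  · obtain ⟨r, rfl⟩ := List.length_eq_one_iff.mp hl
    have hc : colsI ([r] : List (List Int)).length = [(0 : Int)] := by
      show colsI 1 = [(0 : Int)]
      decide
    rw [determinant_of_matrix, if_pos (by simp [PySem.List.len_eq]), hc]
    simp only [PySem.List.pyGetD_zero_cons]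
    simp [v]
  · have h2 : 2 ≤ mat.length := by
      cases mat with
      | nil => exact absurd rfl h
      | cons r R => simp only [List.length_cons] at hl ⊢; omega
    obtain ⟨r, R, rfl⟩ : ∃ r R, mat = r :: R := by
      cases mat with
      | nil => exact absurd rfl h
      | cons r R => exact ⟨r, R, rfl⟩
    rw [loop_expand _ hl]
    have hclen : (colsI (r :: R).length).length = (r :: R).length := by
      rw [colsI, PySem.List.length_pyRange_one]; omega
    rw [v_cons r R _ (by
      intro hnil
      have := congrArg List.length hnil
      rw [hclen] at this
      simp at this)]
    rw [hclen]
    apply Finset.sum_congr rfl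
    intro f hf
    have hf' : f < (r :: R).length := Finset.mem_range.mp hf
    have hg : (colsI (r :: R).length).getD f 0 = (f : Int) := by
      rw [colsI, PySem.List.pyRange_zero_natCast]
      rw [PySem.List.getD_map_range _ _ _ _ hf']
    have hcof : get_cofactor (r :: R) 0 (f : Int) ((r :: R).length : Int)
        = Mx R ((colsI (r :: R).length).eraseIdx f) := by
      rw [cof_eq (r :: R) (r :: R).length f rfl hf']
      rfl
    rw [hcof, hg]
    simp only [PySem.List.pyGetD_zero_cons]
    rw [A_v R _ (by
        rw [List.length_eraseIdx, if_pos (by rw [hclen]; exact hf'), hclen]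
        simp)
      (List.ne_nil_of_length_pos (by
        rw [List.length_eraseIdx, if_pos (by rw [hclen]; exact hf'), hclen]
        omega))]

theorem combinations_list_eq (items : List Int) (k : Nat) :
    combinations_list items k = PySem.List.combinations items k := by
  induction items generalizing k with
  | nil => cases k with
    | zero => rfl
    | succ k => rw [combinations_list, PySem.List.combinations_nil_succ]
  | cons x rest ih => cases k with
    | zero => rfl
    | succ k => rw [combinations_list, PySem.List.combinations_cons_succ, ih, ih]

theorem foldl_insert_lookup {κ ν : Type} [BEq κ] [LawfulBEq κ] (g : κ → ν) (L : List κ)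
    (d0 : PySem.Dict κ ν) (S : κ) (hS : S ∈ L) :
    (L.foldl (fun d k => d.insert k (g k)) d0).get? S = some (g S) := by
  induction L using List.reverseRecOn with
  | nil => cases hS
  | append_singleton l x ih =>
      rw [List.foldl_append, List.foldl_cons, List.foldl_nil]
      by_cases hx : S = x
      · subst hx; exact PySem.Dict.get?_insert_self _ _ _
      · have hSl : S ∈ l := by
          rcases List.mem_append.mp hS with h | h
          · exact h
          · exact absurd (by simpa using h) hx
        rw [PySem.Dict.get?_insert_of_ne _ _ hx]
        exact ih hSl

-- B's per-size step, verbatim the outer-loop body of the port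
def bstep (mat : List (List Int)) (dp : PySem.Dict (List Int) Int) (size : Int) :
    PySem.Dict (List Int) Int :=
  (combinations_list (PySem.List.pyRange 0 (PySem.List.len mat) 1) size.toNat).foldl
    (fun new_dp subset =>
      PySem.Dict.insert new_dp subset
        (((PySem.List.pyRange 0 size 1).foldl (fun (st : Int × Int) idx =>
          (st.1 + st.2 * PySem.List.pyGetD (PySem.List.pyGetD mat (PySem.List.len mat - size) [])
                    (PySem.List.pyGetD subset idx 0) 0 *
             PySem.Dict.getD dp
               (PySem.List.slice subset none (some idx) ++
                PySem.List.slice subset (some (idx + 1)) none) 0,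
           -st.2)) (0, 1)).1)) PySem.Dict.empty

theorem alt_eq (mat : List (List Int)) :
    determinant_of_matrix_alt mat =
      PySem.Dict.getD
        ((PySem.List.pyRange 1 (PySem.List.len mat + 1) 1).foldl (bstep mat)
          (PySem.Dict.insert PySem.Dict.empty [] 1))
        (PySem.List.pyRange 0 (PySem.List.len mat) 1) 0 := rfl

theorem bstep_inv (mat : List (List Int)) (s : Nat) (hs : s + 1 ≤ mat.length)
    (dp : PySem.Dict (List Int) Int)
    (hdp : ∀ S, S.Sublist (colsI mat.length) → S.length = s →
      dp.get? S = some (v (mat.drop (mat.length - s)) S)) :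
    ∀ S, S.Sublist (colsI mat.length) → S.length = s + 1 →
      (bstep mat dp ((s : Int) + 1)).get? S
        = some (v (mat.drop (mat.length - (s + 1))) S) := by
  intro S hsub hS1
  unfold bstep
  rw [show ((s : Int) + 1) = ((s + 1 : Nat) : Int) from by push_cast; ring]
  rw [PySem.List.len_eq]
  rw [Int.toNat_natCast]
  rw [combinations_list_eq]
  have hmem : S ∈ PySem.List.combinations (PySem.List.pyRange 0 (mat.length : Int) 1) (s + 1) :=
    (PySem.List.mem_combinations_iff _ _ _).mpr ⟨hsub, hS1⟩
  rw [foldl_insert_lookup (g := fun subset =>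
      ((PySem.List.pyRange 0 ((s + 1 : Nat) : Int) 1).foldl (fun (st : Int × Int) idx =>
        (st.1 + st.2 * PySem.List.pyGetD
              (PySem.List.pyGetD mat ((mat.length : Int) - ((s + 1 : Nat) : Int)) [])
              (PySem.List.pyGetD subset idx 0) 0 *
           PySem.Dict.getD dp
             (PySem.List.slice subset none (some idx) ++
              PySem.List.slice subset (some (idx + 1)) none) 0,
         -st.2)) (0, 1)).1) _ _ S hmem]
  congr 1
  rw [PySem.List.pyRange_zero_natCast, List.foldl_map]
  rw [signLoop (fun idx => PySem.List.pyGetD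
        (PySem.List.pyGetD mat ((mat.length : Int) - ((s + 1 : Nat) : Int)) [])
        (PySem.List.pyGetD S (idx : Int) 0) 0)
      (fun idx => PySem.Dict.getD dp
        (PySem.List.slice S none (some (idx : Int)) ++
         PySem.List.slice S (some ((idx : Int) + 1)) none) 0) (s + 1) 0 1]
  simp only [one_mul, zero_add]
  have hlt : mat.length - (s + 1) < mat.length := by omega
  have hdrop : mat.drop (mat.length - (s + 1))
      = mat[mat.length - (s + 1)]'hlt :: mat.drop (mat.length - s) := by
    rw [List.drop_eq_getElem_cons hlt,
        show mat.length - (s + 1) + 1 = mat.length - s from by omega]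
  rw [hdrop, v_cons _ _ S (by
    intro h; rw [h] at hS1; simp at hS1), hS1]
  apply Finset.sum_congr rfl
  intro idx hidx
  have hidx' : idx < s + 1 := Finset.mem_range.mp hidx
  have hrow : PySem.List.pyGetD mat ((mat.length : Int) - ((s + 1 : Nat) : Int)) []
      = mat[mat.length - (s + 1)]'hlt := by
    rw [← Nat.cast_sub hs, PySem.List.pyGetD_natCast]
    exact List.getD_eq_getElem _ _ hlt
  have hslice : PySem.List.slice S none (some (idx : Int)) ++
      PySem.List.slice S (some ((idx : Int) + 1)) none = S.eraseIdx idx := by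
    rw [PySem.List.slice_to_natCast,
        show ((idx : Int) + 1) = ((idx + 1 : Nat) : Int) from by push_cast; ring,
        PySem.List.slice_from_natCast, ← List.eraseIdx_eq_take_drop_succ]
  have hget := hdp (S.eraseIdx idx) ((List.eraseIdx_sublist S idx).trans hsub)
    (by rw [List.length_eraseIdx, if_pos (by omega)]; omega)
  rw [hrow, hslice, PySem.List.pyGetD_natCast,
      PySem.Dict.getD_of_get?_eq_some _ _ hget]

theorem B_inv (mat : List (List Int)) (s : Nat) (hs : s ≤ mat.length) :
    ∀ S, S.Sublist (colsI mat.length) → S.length = s →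
      ((PySem.List.pyRange 1 ((s : Int) + 1) 1).foldl (bstep mat)
        (PySem.Dict.insert PySem.Dict.empty [] 1)).get? S
        = some (v (mat.drop (mat.length - s)) S) := by
  induction s with
  | zero =>
      intro S hsub hS0
      rw [show ((0 : Nat) : Int) + 1 = 1 from by norm_num,
          PySem.List.pyRange_one_eq_nil le_rfl, List.foldl_nil]
      obtain rfl : S = [] := List.length_eq_zero_iff.mp hS0
      rw [PySem.Dict.get?_insert_self, v_nil]
  | succ s ih =>
      intro S hsub hS1
      rw [show (((s + 1 : Nat)) : Int) + 1 = ((s : Int) + 1) + 1 from by push_cast; ring]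
      rw [PySem.List.pyRange_one_succ_right (by omega), List.foldl_append,
          List.foldl_cons, List.foldl_nil]
      exact bstep_inv mat s hs _ (ih (by omega)) S hsub hS1

theorem B_eq_v (mat : List (List Int)) :
    determinant_of_matrix_alt mat = v mat (colsI mat.length) := by
  rw [alt_eq, PySem.List.len_eq]
  rw [show PySem.List.pyRange 0 (mat.length : Int) 1 = colsI mat.length from rfl]
  have hlen : (colsI mat.length).length = mat.length := by
    rw [colsI, PySem.List.length_pyRange_one]; omega
  have h := B_inv mat mat.length le_rfl (colsI mat.length) (List.Sublist.refl _) hlen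
  rw [PySem.Dict.getD_of_get?_eq_some _ _ h]
  simp

-- ===== VERDICT (by name: the statement is the Claim_ definition above) =====
theorem determinant_of_matrix_spec : Claim_unchanged_determinant_of_matrix := by
  intro mat _ _ hD
  have hne : mat ≠ [] := hD
  rw [A_top mat hne, B_eq_v mat]

theorem determinant_of_matrix_changed : Claim_changed_determinant_of_matrix := by
  unfold Claim_changed_determinant_of_matrix
  refine ⟨by decide, by decide, rfl, ?_, by decide, by decide⟩
  rw [determinant_of_matrix]
  decide

theorem determinant_of_matrix_tight : Claim_exact_determinant_of_matrix := by
  intro mat _ _ hD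
  subst hD
  rw [determinant_of_matrix]
  decide
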